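-- pv_equiv track=rewrite | github.com/graceeputnam/learning_python | final/language_processing/remove_frequent.py | make_filter
-- ===== SOURCE A (Python) =====
-- from string import punctuation
--
-- def make_filter(words):
--     filter = {}
--     words = words.split()
--     for word in words:
--         word = word.strip()
--         word = word.strip(punctuation)
--         word = word.lower()
--         if word not in filter:
--             filter[word] = 0
--         if word in filter:
--             filter[word] += 1
--     return filter
-- ===== SOURCE B (Python) =====
-- from string import punctuation
--
-- def make_filter(words):
--     normalized = [w.strip().strip(punctuation).lower() for w in words.split()]
--     return {w: normalized.count(w) for w in dict.fromkeys(normalized)}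
-- ===== Notes on version B (the rewrite author's own statement) =====
-- stated objective: idiomatic
-- what changed: Replaces the stateful single-pass dict accumulation (insert-0-then-increment per word) with a two-phase comprehension: build the normalized word list once, then count each distinct word (dict.fromkeys order) by repeated list.count scans.
import Mathlib
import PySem

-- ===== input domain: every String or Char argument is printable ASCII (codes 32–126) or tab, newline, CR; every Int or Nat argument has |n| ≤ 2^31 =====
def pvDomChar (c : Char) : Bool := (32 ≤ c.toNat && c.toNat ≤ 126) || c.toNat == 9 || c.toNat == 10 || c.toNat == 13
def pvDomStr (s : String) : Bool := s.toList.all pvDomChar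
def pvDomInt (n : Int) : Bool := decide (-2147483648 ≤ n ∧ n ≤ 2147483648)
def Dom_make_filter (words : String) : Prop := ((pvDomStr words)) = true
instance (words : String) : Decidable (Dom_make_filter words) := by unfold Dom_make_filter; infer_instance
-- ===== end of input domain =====

-- B builds the normalized word list once and counts each distinct word by repeated scans
-- (dict.fromkeys order), instead of A's stateful insert-0-then-increment dict loop; alternative shape, not faster.

-- string.punctuation
def pvPunct : String := "!\"#$%&'()*+,-./:;<=>?@[\\]^_`{|}~"

-- ===== PORT A =====
def make_filter (words : String) : List (String × Int) :=
  ((PySem.Str.split₀ words).foldl (fun filter word =>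
      let word := PySem.Str.strip word
      let word := PySem.Str.stripChars word pvPunct
      let word := PySem.Str.lower word
      let filter := if filter.contains word then filter else filter.insert word 0
      if filter.contains word then filter.insert word (filter.getD word 0 + 1) else filter)
    PySem.Dict.empty).items

-- ===== PORT B =====
def pvNorm (w : String) : String :=
  PySem.Str.lower (PySem.Str.stripChars (PySem.Str.strip w) pvPunct)

def make_filter_alt (words : String) : List (String × Int) :=
  let normalized := (PySem.Str.split₀ words).map pvNorm
  (PySem.List.dedup normalized).map (fun w => (w, (normalized.count w : Int)))

-- ===== PRECONDITION & SPEC =====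
def Spec_make_filter (words : String) (out : List (String × Int)) : Prop := out = make_filter_alt words
instance (words : String) (out : List (String × Int)) : Decidable (Spec_make_filter words out) := by unfold Spec_make_filter; infer_instance

-- ===== CLAIM (what is proved, stated in full; the proofs are below) =====
def Claim_equal_make_filter : Prop := ∀ (words : String), Dom_make_filter words → Spec_make_filter words (make_filter words)

-- ===== LEMMAS AND PROOFS =====

-- A's two-if body is exactly "insert word (getD word 0 + 1)"
theorem pv_step_eq (d : PySem.Dict String Int) (w : String) :
    (let word := PySem.Str.strip w
     let word := PySem.Str.stripChars word pvPunct
     let word := PySem.Str.lower word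
     let filter := if d.contains word then d else d.insert word 0
     if filter.contains word then filter.insert word (filter.getD word 0 + 1) else filter)
    = d.insert (pvNorm w) (d.getD (pvNorm w) 0 + 1) := by
  simp only [pvNorm]
  set x := PySem.Str.lower (PySem.Str.stripChars (PySem.Str.strip w) pvPunct)
  by_cases h : d.contains x = true
  · simp [h]
  · simp only [Bool.not_eq_true] at h
    simp [h, PySem.Dict.contains_insert_self, PySem.Dict.getD_insert_self,
      PySem.Dict.insert_insert_self, PySem.Dict.getD_of_not_contains d (0:Int) h]

-- ===== VERDICT (by name: the statement is the Claim_ definition above) =====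
theorem make_filter_spec : Claim_equal_make_filter := by
  intro words _
  show make_filter words = make_filter_alt words
  unfold make_filter make_filter_alt
  rw [show (fun (filter : PySem.Dict String Int) (word : String) =>
      let word := PySem.Str.strip word
      let word := PySem.Str.stripChars word pvPunct
      let word := PySem.Str.lower word
      let filter := if filter.contains word then filter else filter.insert word 0
      if filter.contains word then filter.insert word (filter.getD word 0 + 1) else filter)
    = fun d w => d.insert (pvNorm w) (d.getD (pvNorm w) 0 + 1) from funext fun d => funext fun w => pv_step_eq d w]
  rw [← List.foldl_map (f := pvNorm) (g := fun (d : PySem.Dict String Int) x => d.insert x (d.getD x 0 + 1))]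
  rw [PySem.Dict.foldl_insert_getD_add_one_eq_counter, PySem.Dict.items_counter]
  simp
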